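-- pv_equiv track=rewrite | github.com/ultragenix/AdventOfCode | labos.py | rotationLeft
-- ===== SOURCE A (Python) =====
-- def rotationLeft(current_position, number_rotation):
--     """
--     Rotate left (counter-clockwise) on the circular track.
--
--     Args:
--         current_position: Current position (0-99)
--         number_rotation: Number of steps to rotate left
--
--     Returns:
--         New position after rotating left
--     """
--
--     zero_count = 0
--     # Rotate left the specified number of times
--     for _ in range(number_rotation):
--         current_position -= 1
--
--         if current_position == 0:
--             zero_count += 1
--
--         # Wrap around: if position goes below 0, jump to 99
--         if current_position == -1:
--             current_position = 99
--
--     return current_position, zero_count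
-- ===== SOURCE B (Python) =====
-- def rotationLeft(current_position, number_rotation):
--     """
--     Rotate left (counter-clockwise) on the 100-cell circular track, in O(1):
--     jump straight to the first landing on cell 0, then count whole laps.
--
--     Args:
--         current_position: Current position (0-99)
--         number_rotation: Number of steps to rotate left
--
--     Returns:
--         New position after rotating left, and how many times cell 0 was visited
--     """
--     p, n = current_position, max(number_rotation, 0)
--     zeros = 0
--     if 1 <= p <= n:
--         # we land on cell 0 after exactly p steps
--         n -= p
--         p = 0
--         zeros = 1
--     if p == 0 and n > 0:
--         # from cell 0, every full lap of 100 steps lands on 0 once more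
--         laps, rem = divmod(n, 100)
--         zeros += laps
--         p = -rem % 100
--         n = 0
--     return p - n, zeros
-- ===== Notes on version B (the rewrite author's own statement) =====
-- stated objective: faster
-- what changed: Replaced the one-cell-per-iteration decrement loop with an O(1) event-jump computation: jump straight to the first landing on cell 0 (n -= p), count remaining full laps with divmod(n, 100), and read the final position off the remainder.
import Mathlib
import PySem

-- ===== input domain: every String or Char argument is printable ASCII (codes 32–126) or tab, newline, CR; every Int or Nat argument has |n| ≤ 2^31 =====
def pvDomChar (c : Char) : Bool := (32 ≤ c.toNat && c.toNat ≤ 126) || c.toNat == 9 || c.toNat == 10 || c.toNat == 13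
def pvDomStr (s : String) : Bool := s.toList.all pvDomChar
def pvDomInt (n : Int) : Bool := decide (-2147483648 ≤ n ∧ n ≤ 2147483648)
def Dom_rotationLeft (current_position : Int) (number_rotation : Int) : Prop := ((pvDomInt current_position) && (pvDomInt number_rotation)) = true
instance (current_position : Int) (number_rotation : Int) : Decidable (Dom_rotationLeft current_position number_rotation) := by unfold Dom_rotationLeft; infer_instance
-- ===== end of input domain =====

-- B replaces A's one-cell-at-a-time decrement loop by an O(1) event-jump computation (objective: faster, asymptotic).

-- ===== PORT A =====
-- the for-loop of A: fuel = remaining iterations, state = (current_position, zero_count)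
def rotLoopA : Nat → Int → Int → Int × Int
  | 0, p, z => (p, z)
  | Nat.succ k, p, z =>
      let p1 := p - 1
      let z1 := if p1 = 0 then z + 1 else z
      let p2 := if p1 = -1 then (99 : Int) else p1
      rotLoopA k p2 z1

def rotationLeft (current_position : Int) (number_rotation : Int) : Int × Int :=
  rotLoopA number_rotation.toNat current_position 0

-- ===== PORT B =====
-- Source B step for step; state after each 'if' is a triple (p, n, zeros)
def rotationLeft_alt (current_position : Int) (number_rotation : Int) : Int × Int :=
  let t1 : Int × Int × Int :=
    if 1 ≤ current_position ∧ current_position ≤ max number_rotation 0 then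
      (0, max number_rotation 0 - current_position, 1)
    else (current_position, max number_rotation 0, 0)
  let t2 : Int × Int × Int :=
    if t1.1 = 0 ∧ 0 < t1.2.1 then
      (PySem.Int.mod (-(PySem.Int.mod t1.2.1 100)) 100, 0,
       t1.2.2 + PySem.Int.floordiv t1.2.1 100)
    else t1
  (t2.1 - t2.2.1, t2.2.2)

-- ===== PRECONDITION & SPEC =====
def Spec_rotationLeft (current_position : Int) (number_rotation : Int) (out : Int × Int) : Prop := out = rotationLeft_alt current_position number_rotation
instance (current_position : Int) (number_rotation : Int) (out : Int × Int) : Decidable (Spec_rotationLeft current_position number_rotation out) := by unfold Spec_rotationLeft; infer_instance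

-- ===== CLAIM (what is proved, stated in full; the proofs are below) =====
def Claim_equal_rotationLeft : Prop := ∀ (current_position : Int) (number_rotation : Int), Dom_rotationLeft current_position number_rotation → Spec_rotationLeft current_position number_rotation (rotationLeft current_position number_rotation)

-- ===== LEMMAS AND PROOFS =====

theorem pvFd (a : Int) : PySem.Int.floordiv a 100 = a / 100 :=
  PySem.Int.floordiv_eq_ediv_of_pos (by norm_num)

theorem pvMd (a : Int) : PySem.Int.mod a 100 = a % 100 :=
  PySem.Int.mod_eq_emod_of_pos (by norm_num)

-- proof-side closed form of A's loop started inside the circle (0 ≤ p ≤ 99)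
def rotCore (p n : Int) : Int × Int :=
  let first : Int := if p ≥ 1 then p else 100
  let zeros : Int := if n ≥ first then (n - first) / 100 + 1 else 0
  ((p - n) % 100, zeros)

-- below the circle: the loop just decrements, never hits 0 or the wrap
theorem rotLoopA_neg (k : Nat) : ∀ (p z : Int), p ≤ -1 → rotLoopA k p z = (p - k, z) := by
  induction k with
  | zero => intro p z _; simp [rotLoopA]
  | succ k ih =>
      intro p z hp
      have h0 : p - 1 ≠ 0 := by omega
      have h1 : p - 1 ≠ -1 := by omega
      simp only [rotLoopA, h0, h1, if_false]
      rw [ih (p - 1) z (by omega)]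
      simp only [Prod.mk.injEq, and_true]
      omega

-- on the circle: the loop computes rotCore's closed form
theorem rotLoopA_core (k : Nat) : ∀ (p z : Int), 0 ≤ p → p ≤ 99 → 1 ≤ (k : Int) →
    rotLoopA k p z = ((rotCore p k).1, z + (rotCore p k).2) := by
  induction k with
  | zero => intro p z _ _ hk; exact absurd hk (by norm_num)
  | succ k ih =>
      intro p z hp0 hp99 _
      by_cases hk1 : k = 0
      · -- exactly one step of the loop
        subst hk1
        have hcast : ((Nat.succ 0 : Nat) : Int) = 1 := by norm_num
        simp only [rotLoopA, rotCore, hcast]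
        split_ifs <;> simp only [Prod.mk.injEq] <;> omega
      · have hk : 1 ≤ (k : Int) := by omega
        have hcast : ((Nat.succ k : Nat) : Int) = (k:Int) + 1 := by push_cast; ring
        rcases eq_or_ne p 0 with h0 | h0
        · -- wrap step: p = 0 goes to 99, no zero counted
          subst h0
          have step : rotLoopA (Nat.succ k) 0 z = rotLoopA k 99 z := by
            norm_num [rotLoopA]
          rw [step, ih 99 z (by norm_num) (by norm_num) hk, hcast]
          simp only [rotCore]
          split_ifs <;> simp only [Prod.mk.injEq, and_true] <;> omega
        · -- ordinary step: p ≥ 1 goes to p-1; a zero is counted iff p = 1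
          have hne : p - 1 ≠ -1 := by omega
          simp only [rotLoopA, hne, if_false]
          rw [ih (p - 1) (if p - 1 = 0 then z + 1 else z) (by omega) (by omega) hk, hcast]
          simp only [rotCore]
          split_ifs <;> simp only [Prod.mk.injEq, and_true] <;> omega

-- above the circle: descend to 99 first, then the core closed form
theorem rotLoopA_big (k : Nat) : ∀ (p z : Int), 100 ≤ p →
    rotLoopA k p z =
      if (k : Int) ≤ p - 99 then (p - k, z)
      else ((rotCore 99 (k - (p - 99))).1, z + (rotCore 99 (k - (p - 99))).2) := by
  induction k with
  | zero => intro p z hp; simp [rotLoopA]; omega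
  | succ k ih =>
      intro p z hp
      have h0 : p - 1 ≠ 0 := by omega
      have h1 : p - 1 ≠ -1 := by omega
      simp only [rotLoopA, h0, h1, if_false]
      have hcast : ((Nat.succ k : Nat) : Int) = (k:Int) + 1 := by push_cast; ring
      rcases lt_or_ge 100 p with hbig | hlow
      · rw [ih (p - 1) z (by omega), hcast]
        have harg : (k:Int) - ((p - 1) - 99) = (k:Int) + 1 - (p - 99) := by ring
        have hcond : ((k:Int) ≤ (p - 1) - 99) ↔ ((k:Int) + 1 ≤ p - 99) := by omega
        split_ifs with hA hB hB
        · simp only [Prod.mk.injEq, and_true]; omega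
        · exact absurd (hcond.mp hA) hB
        · exact absurd (hcond.mpr hB) hA
        · rw [harg]
      · have hp100 : p = 100 := by omega
        subst hp100
        have h99 : (100 : Int) - 1 = 99 := by norm_num
        rw [hcast, h99]
        rcases Nat.eq_zero_or_pos k with hk0 | hkpos
        · subst hk0
          simp [rotLoopA]
        · have hk1 : 1 ≤ (k : Int) := by exact_mod_cast hkpos
          rw [rotLoopA_core k 99 z (by norm_num) (by norm_num) hk1]
          have hc : ¬ ((k:Int) + 1 ≤ (100:Int) - 99) := by omega
          rw [if_neg hc]
          have harg : (k:Int) + 1 - ((100:Int) - 99) = (k:Int) := by ring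
          rw [harg]

-- ===== VERDICT (by name: the statement is the Claim_ definition above) =====
theorem rotationLeft_spec : Claim_equal_rotationLeft := by
  intro p n _
  show rotationLeft p n = rotationLeft_alt p n
  unfold rotationLeft
  by_cases hn : n ≤ 0
  · have h0 : n.toNat = 0 := Int.toNat_of_nonpos hn
    rw [h0]
    simp only [rotLoopA, rotationLeft_alt, Int.max_def, pvFd, pvMd]
    split_ifs <;> (try simp_all) <;> omega
  · have hn1 : 1 ≤ n := by omega
    have hcast : ((n.toNat : Nat) : Int) = n := Int.toNat_of_nonneg (by omega)
    by_cases hpneg : p ≤ -1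
    · rw [rotLoopA_neg n.toNat p 0 hpneg, hcast]
      simp only [rotationLeft_alt, Int.max_def, pvFd, pvMd]
      split_ifs <;> (try simp_all) <;> omega
    · by_cases hpbig : 100 ≤ p
      · rw [rotLoopA_big n.toNat p 0 hpbig, hcast]
        simp only [rotationLeft_alt, rotCore, Int.max_def, pvFd, pvMd]
        split_ifs <;> (try simp_all) <;> omega
      · rw [rotLoopA_core n.toNat p 0 (by omega) (by omega) (by rw [hcast]; exact hn1), hcast]
        simp only [rotationLeft_alt, rotCore, Int.max_def, pvFd, pvMd]
        split_ifs <;> (try simp_all) <;> omega
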